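-- pv_equiv track=rewrite | github.com/joereddington/majorEncoder | set_generator.py | convert_to_integer
-- ===== SOURCE A (Python) =====
-- def convert_to_integer(word):
--     replace_dict = {
--         'l': '1',
--         'n': '2',
--         'm': '3',
--         'r': '4',
--         'f': '5',
--         'v': '5',
--         'b': '6',
--         'p': '6',
--         't': '7',
--         'ch': '8',
--         'sh': '8',
--         'g': '9',
--         's': '0',
--         'd': '9',
--         'z': '0'
--     }
--
--     # Reverse the replace_dict for easier replacement
--     replace_dict_reverse = {k: v for k, v in replace_dict.items()}
--
--     for key, value in replace_dict_reverse.items():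
--         word = word.replace(key, value)
--     # Remove all non-numeric characters
--     result = ''.join([char for char in word if char.isdigit()])
--
--     return result
-- ===== SOURCE B (Python) =====
-- def convert_to_integer(word):
--     single_map = {
--         'l': '1', 'n': '2', 'm': '3', 'r': '4', 'f': '5', 'v': '5',
--         'b': '6', 'p': '6', 't': '7', 'g': '9', 's': '0', 'd': '9', 'z': '0'
--     }
--     out = []
--     i = 0
--     n = len(word)
--     while i < n:
--         if word[i:i+2] in ('ch', 'sh'):
--             out.append('8')
--             i += 2
--             continue
--         ch = word[i]
--         digit = single_map.get(ch)
--         if digit is not None: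
--             out.append(digit)
--         elif ch.isdigit():
--             out.append(ch)
--         i += 1
--     return ''.join(out)
-- ===== Notes on version B (the rewrite author's own statement) =====
-- stated objective: alternative
-- what changed: Replaces A's 15 sequential whole-string str.replace passes followed by a digit-filter pass with a single left-to-right scan that checks the two-letter digraphs ('ch'/'sh' -> '8') first and otherwise maps, keeps or drops the single character via one dict lookup.
import Mathlib
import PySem

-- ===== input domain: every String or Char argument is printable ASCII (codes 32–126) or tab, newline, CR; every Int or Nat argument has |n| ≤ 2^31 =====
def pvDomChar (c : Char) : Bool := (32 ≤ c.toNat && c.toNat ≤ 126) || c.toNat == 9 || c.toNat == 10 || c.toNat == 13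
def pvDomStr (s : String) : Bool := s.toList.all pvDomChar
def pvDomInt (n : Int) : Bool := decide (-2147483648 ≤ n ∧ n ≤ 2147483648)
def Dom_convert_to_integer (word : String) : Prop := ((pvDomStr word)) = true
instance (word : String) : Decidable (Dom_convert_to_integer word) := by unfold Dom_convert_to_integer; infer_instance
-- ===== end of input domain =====

-- B replaces A's 15 sequential str.replace passes plus digit-filter pass by one left-to-right scan (digraphs 'ch'/'sh' first, then the single-letter map, keeping digits); objective: alternative single-pass algorithm.

-- ===== PORT A =====
def convert_to_integer (word : String) : String :=
  let replace_dict : PySem.Dict String String :=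
    PySem.Dict.ofList [("l","1"),("n","2"),("m","3"),("r","4"),("f","5"),("v","5"),
      ("b","6"),("p","6"),("t","7"),("ch","8"),("sh","8"),("g","9"),("s","0"),("d","9"),("z","0")]
  -- replace_dict_reverse = {k: v for k, v in replace_dict.items()}
  let replace_dict_reverse : PySem.Dict String String :=
    replace_dict.items.foldl (fun d kv => d.insert kv.1 kv.2) PySem.Dict.empty
  -- for key, value in replace_dict_reverse.items(): word = word.replace(key, value)
  let word := replace_dict_reverse.items.foldl (fun w kv => PySem.Str.replace w kv.1 kv.2) word
  -- ''.join([char for char in word if char.isdigit()])  (char is a 1-char string; its isdigit is Chars.isdigit of the char)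
  PySem.Str.join "" ((word.toList.filter (fun ch => PySem.Chars.isdigit ch)).map (fun ch => String.mk [ch]))

-- ===== PORT B =====
def pvSingleMap : PySem.Dict Char Char :=
  PySem.Dict.mk [('l','1'),('n','2'),('m','3'),('r','4'),('f','5'),('v','5'),
    ('b','6'),('p','6'),('t','7'),('g','9'),('s','0'),('d','9'),('z','0')]

-- the loop body below 'if word[i:i+2] in ("ch","sh")': emit for a single char
def pvEmit (x : Char) : List Char :=
  match pvSingleMap.get? x with
  | some d => [d]
  | none => if PySem.Chars.isdigit x then [x] else []

-- the while loop over i, as recursion on the remaining characters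
def pvScan : List Char → List Char
  | x :: y :: rest =>
    if (x = 'c' ∨ x = 's') ∧ y = 'h' then '8' :: pvScan rest
    else pvEmit x ++ pvScan (y :: rest)
  | [x] => pvEmit x
  | [] => []

def convert_to_integer_alt (word : String) : String := String.mk (pvScan word.toList)

-- ===== PRECONDITION & SPEC =====
def Spec_convert_to_integer (word : String) (out : String) : Prop := out = convert_to_integer_alt word
instance (word : String) (out : String) : Decidable (Spec_convert_to_integer word out) := by unfold Spec_convert_to_integer; infer_instance

-- ===== CLAIM (what is proved, stated in full; the proofs are below) =====
def Claim_equal_convert_to_integer : Prop := ∀ (word : String), Dom_convert_to_integer word → Spec_convert_to_integer word (convert_to_integer word)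

-- ===== LEMMAS AND PROOFS =====

-- single-character substitution, the effect of one `replace` pass with a 1-char key
def pvSub (c d x : Char) : Char := if x = c then d else x

-- composite of the nine single-letter passes before 'ch' (in A's order l,n,m,r,f,v,b,p,t), layered
def pvS2 (x : Char) : Char := pvSub 'n' '2' (pvSub 'l' '1' x)
def pvS3 (x : Char) : Char := pvSub 'm' '3' (pvS2 x)
def pvS4 (x : Char) : Char := pvSub 'r' '4' (pvS3 x)
def pvS5 (x : Char) : Char := pvSub 'f' '5' (pvS4 x)
def pvS6 (x : Char) : Char := pvSub 'v' '5' (pvS5 x)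
def pvS7 (x : Char) : Char := pvSub 'b' '6' (pvS6 x)
def pvS8 (x : Char) : Char := pvSub 'p' '6' (pvS7 x)
def pvSig1 (x : Char) : Char := pvSub 't' '7' (pvS8 x)

-- composite of the four single-letter passes after 'sh' (g,s,d,z), layered
def pvT2 (x : Char) : Char := pvSub 's' '0' (pvSub 'g' '9' x)
def pvT3 (x : Char) : Char := pvSub 'd' '9' (pvT2 x)
def pvSig2 (x : Char) : Char := pvSub 'z' '0' (pvT3 x)

-- one replace pass with a 2-char key [a,'h'] and replacement '8'
def pvRepl2 (a : Char) : List Char → List Char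
  | x :: y :: t => if x = a ∧ y = 'h' then '8' :: pvRepl2 a t else x :: pvRepl2 a (y :: t)
  | [x] => [x]
  | [] => []

-- the value of A's chain, in closed form
def pvF (cs : List Char) : List Char :=
  (List.map pvSig2 (pvRepl2 's' (pvRepl2 'c' (List.map pvSig1 cs)))).filter PySem.Chars.isdigit

theorem pvGo1 (c d : Char) (fuel : Nat) (l acc : List Char) (h : l.length ≤ fuel) :
    PySem.Chars.replace.go [c] [d] fuel l acc = acc.reverse ++ l.map (pvSub c d) := by
  induction fuel generalizing l acc with
  | zero =>
    have : l = [] := List.eq_nil_of_length_eq_zero (Nat.le_zero.mp h)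
    subst this; simp [PySem.Chars.replace.go]
  | succ n ih =>
    cases l with
    | nil => simp [PySem.Chars.replace.go]
    | cons x t =>
      simp only [PySem.Chars.replace.go]
      have ht : t.length ≤ n := by simpa using h
      by_cases hx : x = c
      · rw [if_pos (by simp [List.isPrefixOf, hx])]
        simp [ih _ _ ht, pvSub, hx]
      · rw [if_neg (by simp [List.isPrefixOf]; intro hc; exact (hx hc.symm).elim)]
        simp [ih _ _ ht, pvSub, hx]

theorem pvGo2 (a : Char) (fuel : Nat) (l acc : List Char) (h : l.length ≤ fuel) :
    PySem.Chars.replace.go [a, 'h'] ['8'] fuel l acc = acc.reverse ++ pvRepl2 a l := by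
  induction fuel generalizing l acc with
  | zero =>
    have : l = [] := List.eq_nil_of_length_eq_zero (Nat.le_zero.mp h)
    subst this; simp [PySem.Chars.replace.go, pvRepl2]
  | succ n ih =>
    cases l with
    | nil => simp [PySem.Chars.replace.go, pvRepl2]
    | cons x t =>
      simp only [PySem.Chars.replace.go]
      cases t with
      | nil =>
        rw [if_neg (by simp [List.isPrefixOf])]
        cases n with
        | zero => simp [PySem.Chars.replace.go, pvRepl2]
        | succ m => simp [PySem.Chars.replace.go, pvRepl2]
      | cons y t' =>
        have hlen : (x :: y :: t').length ≤ n + 1 := h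
        by_cases hx : x = a ∧ y = 'h'
        · rw [if_pos (by simp [List.isPrefixOf, hx.1, hx.2])]
          have ht : t'.length ≤ n := by simp at hlen; omega
          simp [ih _ _ ht, pvRepl2, hx.1, hx.2]
        · rw [if_neg (by simp [List.isPrefixOf]; intro h1 h2; exact hx ⟨h1.symm, h2.symm⟩)]
          have ht : (y :: t').length ≤ n := by simp at hlen ⊢; omega
          simp [ih _ _ ht, pvRepl2, hx]

theorem pvRepl1_eq (c d : Char) (l : List Char) :
    PySem.Chars.replace l [c] [d] = l.map (pvSub c d) := by
  rw [PySem.Chars.replace]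
  simp [pvGo1 c d l.length l [] (le_refl _)]

theorem pvRepl2_eq (a : Char) (l : List Char) :
    PySem.Chars.replace l [a, 'h'] ['8'] = pvRepl2 a l := by
  rw [PySem.Chars.replace]
  simp [pvGo2 a l.length l [] (le_refl _)]

-- uniform cons equation for pvRepl2
theorem pvRepl2_cons (a z : Char) (K : List Char) :
    pvRepl2 a (z :: K) = if z = a ∧ K.head? = some 'h' then '8' :: pvRepl2 a K.tail
      else z :: pvRepl2 a K := by
  cases K <;> simp [pvRepl2]

theorem pvSig1_fix (x : Char) (h1 : x ≠ 'l') (h2 : x ≠ 'n') (h3 : x ≠ 'm') (h4 : x ≠ 'r')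
    (h5 : x ≠ 'f') (h6 : x ≠ 'v') (h7 : x ≠ 'b') (h8 : x ≠ 'p') (h9 : x ≠ 't') :
    pvSig1 x = x := by
  simp only [pvSig1, pvS8, pvS7, pvS6, pvS5, pvS4, pvS3, pvS2, pvSub]
  rw [if_neg h1, if_neg h2, if_neg h3, if_neg h4, if_neg h5, if_neg h6, if_neg h7,
      if_neg h8, if_neg h9]

theorem pvSig1_c (x : Char) : pvSig1 x = 'c' ↔ x = 'c' := by
  by_cases h1 : x = 'l'; · subst h1; decide
  by_cases h2 : x = 'n'; · subst h2; decide
  by_cases h3 : x = 'm'; · subst h3; decide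
  by_cases h4 : x = 'r'; · subst h4; decide
  by_cases h5 : x = 'f'; · subst h5; decide
  by_cases h6 : x = 'v'; · subst h6; decide
  by_cases h7 : x = 'b'; · subst h7; decide
  by_cases h8 : x = 'p'; · subst h8; decide
  by_cases h9 : x = 't'; · subst h9; decide
  rw [pvSig1_fix x h1 h2 h3 h4 h5 h6 h7 h8 h9]

theorem pvSig1_s (x : Char) : pvSig1 x = 's' ↔ x = 's' := by
  by_cases h1 : x = 'l'; · subst h1; decide
  by_cases h2 : x = 'n'; · subst h2; decide
  by_cases h3 : x = 'm'; · subst h3; decide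
  by_cases h4 : x = 'r'; · subst h4; decide
  by_cases h5 : x = 'f'; · subst h5; decide
  by_cases h6 : x = 'v'; · subst h6; decide
  by_cases h7 : x = 'b'; · subst h7; decide
  by_cases h8 : x = 'p'; · subst h8; decide
  by_cases h9 : x = 't'; · subst h9; decide
  rw [pvSig1_fix x h1 h2 h3 h4 h5 h6 h7 h8 h9]

theorem pvSig1_h (x : Char) : pvSig1 x = 'h' ↔ x = 'h' := by
  by_cases h1 : x = 'l'; · subst h1; decide
  by_cases h2 : x = 'n'; · subst h2; decide
  by_cases h3 : x = 'm'; · subst h3; decide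
  by_cases h4 : x = 'r'; · subst h4; decide
  by_cases h5 : x = 'f'; · subst h5; decide
  by_cases h6 : x = 'v'; · subst h6; decide
  by_cases h7 : x = 'b'; · subst h7; decide
  by_cases h8 : x = 'p'; · subst h8; decide
  by_cases h9 : x = 't'; · subst h9; decide
  rw [pvSig1_fix x h1 h2 h3 h4 h5 h6 h7 h8 h9]

theorem pvRepl2c_head (z : Char) (M : List Char) :
    (pvRepl2 'c' (z :: M)).head? = some 'h' ↔ z = 'h' := by
  rw [pvRepl2_cons]
  split_ifs with h
  · simp; rintro rfl; simp_all
  · simp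

theorem pvToList_mk (l : List Char) : (String.mk l).toList = l :=
  Eq.symm ((fun {_l _s} => String.ofList_eq.mp) rfl)

theorem pvSig2_fix (x : Char) (h10 : x ≠ 'g') (h11 : x ≠ 's') (h12 : x ≠ 'd') (h13 : x ≠ 'z') :
    pvSig2 x = x := by
  simp only [pvSig2, pvT3, pvT2, pvSub]
  rw [if_neg h10]
  rw [if_neg h11, if_neg h12, if_neg h13]

theorem pvEmit_eq (x : Char) :
    pvEmit x = List.filter PySem.Chars.isdigit [pvSig2 (pvSig1 x)] := by
  by_cases h1 : x = 'l'; · subst h1; decide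
  by_cases h2 : x = 'n'; · subst h2; decide
  by_cases h3 : x = 'm'; · subst h3; decide
  by_cases h4 : x = 'r'; · subst h4; decide
  by_cases h5 : x = 'f'; · subst h5; decide
  by_cases h6 : x = 'v'; · subst h6; decide
  by_cases h7 : x = 'b'; · subst h7; decide
  by_cases h8 : x = 'p'; · subst h8; decide
  by_cases h9 : x = 't'; · subst h9; decide
  by_cases h10 : x = 'g'; · subst h10; decide
  by_cases h11 : x = 's'; · subst h11; decide
  by_cases h12 : x = 'd'; · subst h12; decide
  by_cases h13 : x = 'z'; · subst h13; decide
  have hget : pvSingleMap.get? x = none := by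
    unfold pvSingleMap
    simp only [PySem.Dict.get?_mk_cons, beq_iff_eq]
    rw [if_neg (Ne.symm h1), if_neg (Ne.symm h2), if_neg (Ne.symm h3), if_neg (Ne.symm h4),
        if_neg (Ne.symm h5), if_neg (Ne.symm h6), if_neg (Ne.symm h7), if_neg (Ne.symm h8),
        if_neg (Ne.symm h9), if_neg (Ne.symm h10), if_neg (Ne.symm h11), if_neg (Ne.symm h12),
        if_neg (Ne.symm h13)]
    rfl
  unfold pvEmit
  rw [hget, pvSig1_fix x h1 h2 h3 h4 h5 h6 h7 h8 h9, pvSig2_fix x h10 h11 h12 h13]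
  cases hd : PySem.Chars.isdigit x <;> simp [hd]

theorem pvScan_eq (cs : List Char) : pvScan cs = pvF cs := by
  induction cs using pvScan.induct with
  | case1 x y rest h ih =>
    obtain ⟨hx, hy⟩ := h
    subst hy
    unfold pvF at *
    rcases hx with rfl | rfl
    · have hsc : pvScan ('c' :: 'h' :: rest) = '8' :: pvScan rest := by
        rw [pvScan, if_pos (by simp)]
      rw [hsc, show List.map pvSig1 ('c' :: 'h' :: rest) = 'c' :: 'h' :: List.map pvSig1 rest from rfl]
      rw [pvRepl2_cons, if_pos (by simp), List.tail_cons]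
      rw [pvRepl2_cons, if_neg (by simp)]
      rw [List.map_cons, show pvSig2 '8' = '8' from by decide,
          List.filter_cons_of_pos (by decide), ih]
    · have hsc : pvScan ('s' :: 'h' :: rest) = '8' :: pvScan rest := by
        rw [pvScan, if_pos (by simp)]
      rw [hsc, show List.map pvSig1 ('s' :: 'h' :: rest) = 's' :: 'h' :: List.map pvSig1 rest from rfl]
      have hK : pvRepl2 'c' ('h' :: List.map pvSig1 rest) = 'h' :: pvRepl2 'c' (List.map pvSig1 rest) := by
        rw [pvRepl2_cons, if_neg (by simp)]
      have h1 : pvRepl2 'c' ('s' :: 'h' :: List.map pvSig1 rest)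
          = 's' :: 'h' :: pvRepl2 'c' (List.map pvSig1 rest) := by
        rw [pvRepl2_cons, if_neg (by simp), hK]
      rw [h1, pvRepl2_cons, if_pos (by simp), List.tail_cons]
      rw [List.map_cons, show pvSig2 '8' = '8' from by decide,
          List.filter_cons_of_pos (by decide), ih]
  | case2 x y rest h ih =>
    unfold pvF at *
    have hsc : pvScan (x :: y :: rest) = pvEmit x ++ pvScan (y :: rest) := by
      rw [pvScan, if_neg h]
    rw [hsc, show List.map pvSig1 (x :: y :: rest) = pvSig1 x :: pvSig1 y :: List.map pvSig1 rest from rfl]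
    rw [pvRepl2_cons, if_neg (by
      simp only [List.head?_cons, Option.some.injEq, pvSig1_c, pvSig1_h]
      intro hc; exact h ⟨Or.inl hc.1, hc.2⟩)]
    rw [pvRepl2_cons, if_neg (by
      rw [pvRepl2c_head]
      simp only [pvSig1_s, pvSig1_h]
      intro hc; exact h ⟨Or.inr hc.1, hc.2⟩)]
    rw [List.map_cons, List.filter_cons, ih, pvEmit_eq, List.filter_cons]
    split_ifs <;> simp
  | case3 x =>
    unfold pvF
    rw [show List.map pvSig1 [x] = [pvSig1 x] from rfl]
    rw [pvRepl2_cons, if_neg (by simp)]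
    rw [show pvRepl2 'c' ([] : List Char) = [] from rfl]
    rw [pvRepl2_cons, if_neg (by simp)]
    rw [show pvRepl2 's' ([] : List Char) = [] from rfl]
    rw [show pvScan [x] = pvEmit x from rfl]
    exact pvEmit_eq x
  | case4 => rfl

-- the dict round-trip in A produces exactly the literal item list, in order
theorem pvItems_eq :
    ((PySem.Dict.ofList [("l","1"),("n","2"),("m","3"),("r","4"),("f","5"),("v","5"),
      ("b","6"),("p","6"),("t","7"),("ch","8"),("sh","8"),("g","9"),("s","0"),("d","9"),("z","0")]
      : PySem.Dict String String).items.foldl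
        (fun d kv => d.insert kv.1 kv.2) PySem.Dict.empty).items
    = [("l","1"),("n","2"),("m","3"),("r","4"),("f","5"),("v","5"),
      ("b","6"),("p","6"),("t","7"),("ch","8"),("sh","8"),("g","9"),("s","0"),("d","9"),("z","0")] := by
  decide

theorem pvFuse (f g h : Char → Char) (hf : ∀ x, f (g x) = h x) (l : List Char) :
    List.map f (List.map g l) = List.map h l := by
  induction l with
  | nil => rfl
  | cons x t ih => simp only [List.map_cons, ih, hf]

theorem pvA_toList (word : String) :
    (convert_to_integer word).toList = pvF word.toList := by
  unfold convert_to_integer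
  simp only [pvItems_eq]
  simp only [List.foldl_cons, List.foldl_nil]
  rw [PySem.Str.toList_join]
  simp only [List.map_map]
  rw [show (String.toList ∘ fun ch => String.mk [ch]) = fun c => [c] from funext fun c => pvToList_mk [c]]
  rw [show ("" : String).toList = [] from rfl]
  rw [PySem.Chars.join_nil_singletons]
  simp only [PySem.Str.toList_replace]
  rw [show ("l":String).toList = ['l'] from rfl, show ("1":String).toList = ['1'] from rfl,
      show ("n":String).toList = ['n'] from rfl, show ("2":String).toList = ['2'] from rfl,
      show ("m":String).toList = ['m'] from rfl, show ("3":String).toList = ['3'] from rfl,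
      show ("r":String).toList = ['r'] from rfl, show ("4":String).toList = ['4'] from rfl,
      show ("f":String).toList = ['f'] from rfl, show ("v":String).toList = ['v'] from rfl,
      show ("5":String).toList = ['5'] from rfl, show ("b":String).toList = ['b'] from rfl,
      show ("p":String).toList = ['p'] from rfl, show ("6":String).toList = ['6'] from rfl,
      show ("t":String).toList = ['t'] from rfl, show ("7":String).toList = ['7'] from rfl,
      show ("ch":String).toList = ['c','h'] from rfl, show ("sh":String).toList = ['s','h'] from rfl,
      show ("8":String).toList = ['8'] from rfl, show ("g":String).toList = ['g'] from rfl,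
      show ("9":String).toList = ['9'] from rfl, show ("s":String).toList = ['s'] from rfl,
      show ("0":String).toList = ['0'] from rfl, show ("d":String).toList = ['d'] from rfl,
      show ("z":String).toList = ['z'] from rfl]
  rw [pvRepl1_eq, pvRepl1_eq, pvRepl1_eq, pvRepl1_eq, pvRepl1_eq, pvRepl1_eq, pvRepl1_eq,
      pvRepl1_eq, pvRepl1_eq, pvRepl2_eq, pvRepl2_eq, pvRepl1_eq, pvRepl1_eq, pvRepl1_eq,
      pvRepl1_eq]
  rw [pvFuse (pvSub 'n' '2') (pvSub 'l' '1') pvS2 (fun _ => rfl)]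
  rw [pvFuse (pvSub 'm' '3') pvS2 pvS3 (fun _ => rfl)]
  rw [pvFuse (pvSub 'r' '4') pvS3 pvS4 (fun _ => rfl)]
  rw [pvFuse (pvSub 'f' '5') pvS4 pvS5 (fun _ => rfl)]
  rw [pvFuse (pvSub 'v' '5') pvS5 pvS6 (fun _ => rfl)]
  rw [pvFuse (pvSub 'b' '6') pvS6 pvS7 (fun _ => rfl)]
  rw [pvFuse (pvSub 'p' '6') pvS7 pvS8 (fun _ => rfl)]
  rw [pvFuse (pvSub 't' '7') pvS8 pvSig1 (fun _ => rfl)]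
  rw [pvFuse (pvSub 's' '0') (pvSub 'g' '9') pvT2 (fun _ => rfl)]
  rw [pvFuse (pvSub 'd' '9') pvT2 pvT3 (fun _ => rfl)]
  rw [pvFuse (pvSub 'z' '0') pvT3 pvSig2 (fun _ => rfl)]
  rfl

-- ===== VERDICT (by name: the statement is the Claim_ definition above) =====
theorem convert_to_integer_spec : Claim_equal_convert_to_integer := by
  intro word _
  unfold Spec_convert_to_integer convert_to_integer_alt
  apply String.toList_inj.mp
  rw [pvA_toList, pvScan_eq, pvToList_mk]
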